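-- pv_equiv track=rewrite | github.com/willwx/XDream | utils.py | make_ids_unique
-- ===== SOURCE A (Python) =====
-- def make_ids_unique(ids0):
--     """
--     Given a list of IDs, make them unique by appending serial numbers to repeated occurences
--     :param ids0: input list of IDs
--     :return: list of unique IDs
--     """
--     ids = []
--     for id0 in ids0:
--         i = 1
--         id_ = id0
--         while id_ in ids:
--             id_ = '%s_%d' % (id0, i)
--             i += 1
--         ids.append(id_)
--     return ids
-- ===== SOURCE B (Python) =====
-- def make_ids_unique(ids0):
--     """
--     Given a list of IDs, make them unique by appending serial numbers to repeated occurences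
--     :param ids0: input list of IDs
--     :return: list of unique IDs
--     """
--     out = []
--     seen = set()
--     counter = {}
--     for id0 in ids0:
--         if id0 in seen:
--             i = counter.get(id0, 1)
--             cand = f'{id0}_{i}'
--             while cand in seen:
--                 i += 1
--                 cand = f'{id0}_{i}'
--             counter[id0] = i + 1
--         else:
--             cand = id0
--         seen.add(cand)
--         out.append(cand)
--     return out
-- ===== Notes on version B (the rewrite author's own statement) =====
-- stated objective: faster
-- what changed: A rescans the growing result list for every membership test and restarts the suffix search at 1 for each repeated id; B keeps a set of used ids for O(1) membership and a per-prefix counter dict so the suffix search resumes where it last stopped.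
import Mathlib
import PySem

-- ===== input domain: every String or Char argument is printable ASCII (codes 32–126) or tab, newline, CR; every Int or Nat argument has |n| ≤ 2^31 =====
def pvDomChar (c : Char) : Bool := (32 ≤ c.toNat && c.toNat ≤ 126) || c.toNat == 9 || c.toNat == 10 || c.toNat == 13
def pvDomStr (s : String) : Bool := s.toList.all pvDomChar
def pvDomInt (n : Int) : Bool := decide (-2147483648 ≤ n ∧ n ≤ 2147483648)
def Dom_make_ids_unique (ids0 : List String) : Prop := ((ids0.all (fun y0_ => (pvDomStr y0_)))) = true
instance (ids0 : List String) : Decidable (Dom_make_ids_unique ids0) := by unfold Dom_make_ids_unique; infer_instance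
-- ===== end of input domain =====

-- B replaces A's restart-from-1 scan of the growing result list by a set for membership
-- plus a per-prefix counter dict that resumes the suffix search (objective: faster).


-- ===== PORT A =====
-- '%s_%d' % (id0, i): the string id0 + "_" + str(i), built on the List Char side
-- (exact; PySem.Int.toChars is str(i))
def pvCand (id0 : String) (i : Int) : String :=
  String.ofList (id0.toList ++ '_' :: PySem.Int.toChars i)

-- 'while id_ in ids: id_ = '%s_%d' % (id0, i); i += 1' — the fuel argument only makes
-- the loop total; fuel ids.length + 1 is proved sufficient below (pvALoop_spec/pvStep_eq)
def pvALoop (ids : List String) (id0 : String) (i : Int) (id_ : String) : Nat → String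
  | 0 => id_
  | fuel+1 => if id_ ∈ ids then pvALoop ids id0 (i+1) (pvCand id0 i) fuel else id_

def make_ids_unique (ids0 : List String) : List String :=
  ids0.foldl (fun ids id0 => ids ++ [pvALoop ids id0 1 id0 (ids.length + 1)]) []

-- ===== PORT B =====
-- 'while id_ in seen: i += 1; id_ = '%s_%d' % (id0, i)', returning the final i;
-- the fuel argument is a totality guard, proved sufficient below
def pvBLoop (seen : PySem.Set String) (id0 : String) (i : Int) : Nat → Int
  | 0 => i
  | fuel+1 => if pvCand id0 i ∈ seen then pvBLoop seen id0 (i+1) fuel else i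

-- one iteration of B's for loop over the state (ids, seen, counter)
def pvBStep : List String × PySem.Set String × PySem.Dict String Int → String →
    List String × PySem.Set String × PySem.Dict String Int
  | (ids, seen, counter), id0 =>
    if id0 ∈ seen then
      let i := pvBLoop seen id0 (counter.getD id0 1) (seen.length + 1)
      let id_ := pvCand id0 i
      (ids ++ [id_], PySem.Set.add seen id_, counter.insert id0 (i + 1))
    else
      (ids ++ [id0], PySem.Set.add seen id0, counter)

def make_ids_unique_alt (ids0 : List String) : List String :=
  (ids0.foldl pvBStep ([], PySem.Set.empty, PySem.Dict.empty)).1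

-- ===== PRECONDITION & SPEC =====
def Spec_make_ids_unique (ids0 : List String) (out : List String) : Prop := out = make_ids_unique_alt ids0
instance (ids0 : List String) (out : List String) : Decidable (Spec_make_ids_unique ids0 out) := by unfold Spec_make_ids_unique; infer_instance

-- ===== CLAIM (what is proved, stated in full; the proofs are below) =====
def Claim_equal_make_ids_unique : Prop := ∀ (ids0 : List String), Dom_make_ids_unique ids0 → Spec_make_ids_unique ids0 (make_ids_unique ids0)

-- ===== LEMMAS AND PROOFS =====

-- decimal value of a digit list, with accumulator: a left inverse of Nat.toDigits 10
def pvVal (a : Nat) (l : List Char) : Nat := l.foldl (fun a c => a * 10 + (c.toNat - 48)) a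

theorem pvCore_append (fuel : Nat) : ∀ (n : Nat) (ds : List Char),
    Nat.toDigitsCore 10 fuel n ds = Nat.toDigitsCore 10 fuel n [] ++ ds := by
  induction fuel with
  | zero => intro n ds; simp [Nat.toDigitsCore]
  | succ f ih =>
    intro n ds
    simp only [Nat.toDigitsCore]
    by_cases h : n / 10 = 0
    · simp [h]
    · simp only [h, if_false]
      rw [ih (n/10) ((n % 10).digitChar :: ds), ih (n/10) [(n % 10).digitChar]]
      simp

theorem pvVal_core (fuel : Nat) : ∀ (n a : Nat), n < 10 ^ fuel →
    pvVal a (Nat.toDigitsCore 10 fuel n []) =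
      a * 10 ^ (Nat.toDigitsCore 10 fuel n []).length + n := by
  induction fuel with
  | zero => intro n a h; interval_cases n; simp [Nat.toDigitsCore, pvVal]
  | succ f ih =>
    intro n a h
    by_cases h0 : n / 10 = 0
    · have hn : n < 10 := by omega
      simp only [Nat.toDigitsCore, h0, if_true]
      have : ((n % 10).digitChar.toNat - 48) = n := by
        rw [Nat.mod_eq_of_lt hn]; interval_cases n <;> rfl
      simp [pvVal, this]
    · simp only [Nat.toDigitsCore, h0, if_false]
      rw [pvCore_append f (n/10) [(n % 10).digitChar]]
      have hlt : n / 10 < 10 ^ f := by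
        rw [Nat.div_lt_iff_lt_mul (by norm_num)]
        calc n < 10 ^ (f+1) := h
        _ = 10 ^ f * 10 := by ring
      have hv := ih (n/10) a hlt
      have hd : ((n % 10).digitChar.toNat - 48) = n % 10 := by
        have : n % 10 < 10 := Nat.mod_lt _ (by norm_num)
        interval_cases hh : (n % 10) <;> rfl
      simp only [pvVal, List.foldl_append, List.length_append, List.foldl_cons, List.foldl_nil,
        List.length_cons, List.length_nil]
      rw [show (List.foldl (fun a c => a * 10 + (c.toNat - 48)) a (Nat.toDigitsCore 10 f (n/10) [])) = pvVal a (Nat.toDigitsCore 10 f (n/10) []) from rfl, hv, hd]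
      have := Nat.div_add_mod n 10
      ring_nf
      omega

theorem pvToDigits_inj (m n : Nat) (h : Nat.toDigits 10 m = Nat.toDigits 10 n) : m = n := by
  have hb : ∀ k : Nat, k < 10 ^ (k+1) := fun k =>
    lt_of_lt_of_le (Nat.lt_pow_self (by norm_num)) (Nat.pow_le_pow_right (by norm_num) (by omega))
  have hm := pvVal_core (m+1) m 0 (hb m)
  have hn := pvVal_core (n+1) n 0 (hb n)
  unfold Nat.toDigits at h
  rw [h] at hm
  omega

theorem pvToChars_inj (i j : Int) (hi : 1 ≤ i) (hj : 1 ≤ j)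
    (h : PySem.Int.toChars i = PySem.Int.toChars j) : i = j := by
  unfold PySem.Int.toChars at h
  rw [if_neg (by omega), if_neg (by omega)] at h
  have := pvToDigits_inj _ _ h
  omega

theorem pvCand_inj (id0 : String) (i j : Int) (hi : 1 ≤ i) (hj : 1 ≤ j)
    (h : pvCand id0 i = pvCand id0 j) : i = j := by
  unfold pvCand at h
  have h2 := String.ofList_inj.mp h
  exact pvToChars_inj i j hi hj (by simpa using h2)

theorem pvCand_ne_self (id0 : String) (i : Int) : pvCand id0 i ≠ id0 := by
  intro h
  have h2 : (pvCand id0 i).toList = id0.toList := by rw [h]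
  unfold pvCand at h2
  rw [String.toList_ofList] at h2
  have := congrArg List.length h2
  simp at this

-- counting: n distinct candidates of id0 all lying in ids (which also contains id0)
theorem pvCount (ids : List String) (id0 : String) (hmem : id0 ∈ ids) (n : Nat)
    (h : ∀ k : Nat, k < n → pvCand id0 (1 + (k : Int)) ∈ ids) : n ≤ ids.length - 1 := by
  have hsub : (Finset.range n).image (fun k : Nat => pvCand id0 (1 + (k : Int)))
      ⊆ ids.toFinset.erase id0 := by
    intro s hs
    simp only [Finset.mem_image, Finset.mem_range] at hs
    obtain ⟨k, hk, rfl⟩ := hs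
    exact Finset.mem_erase.mpr ⟨pvCand_ne_self id0 _, List.mem_toFinset.mpr (h k hk)⟩
  have hinj : Set.InjOn (fun k : Nat => pvCand id0 (1 + (k : Int))) (Finset.range n) := by
    intro a _ b _ hab
    have := pvCand_inj id0 _ _ (by omega) (by omega) hab
    omega
  have hcard := Finset.card_le_card hsub
  rw [Finset.card_image_of_injOn hinj, Finset.card_range,
    Finset.card_erase_of_mem (List.mem_toFinset.mpr hmem)] at hcard
  have := ids.toFinset_card_le
  omega

-- B's while loop finds start + (first free offset k₀), given enough fuel
theorem pvBLoop_spec (seen : PySem.Set String) (id0 : String) :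
    ∀ (k₀ fuel : Nat) (i : Int), k₀ < fuel →
    pvCand id0 (i + (k₀ : Int)) ∉ seen →
    (∀ k : Nat, k < k₀ → pvCand id0 (i + (k : Int)) ∈ seen) →
    pvBLoop seen id0 i fuel = i + (k₀ : Int) := by
  intro k₀
  induction k₀ with
  | zero =>
    intro fuel i hf h0 _
    obtain ⟨f, rfl⟩ : ∃ f, fuel = f + 1 := ⟨fuel - 1, by omega⟩
    simp only [pvBLoop]
    rw [if_neg (by simpa using h0)]
    simp
  | succ k ih =>
    intro fuel i hf h0 hall
    obtain ⟨f, rfl⟩ : ∃ f, fuel = f + 1 := ⟨fuel - 1, by omega⟩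
    simp only [pvBLoop]
    rw [if_pos (by simpa using hall 0 (by omega))]
    rw [ih f (i+1) (by omega) (by rw [show i + 1 + (k:Int) = i + ((k+1:Nat):Int) by push_cast; ring]; exact h0)
      (fun (m : Nat) (hm : m < k) => by
        rw [show i + 1 + (m:Int) = i + ((m+1:Nat):Int) by push_cast; ring]; exact hall (m+1) (by omega))]
    push_cast; ring

-- A's while loop, mid-flight (about to test candidate i), finds the same candidate
theorem pvALoop_spec (ids : List String) (id0 : String) :
    ∀ (k₀ fuel : Nat) (i : Int), k₀ < fuel →
    pvCand id0 (i + (k₀ : Int)) ∉ ids →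
    (∀ k : Nat, k < k₀ → pvCand id0 (i + (k : Int)) ∈ ids) →
    pvALoop ids id0 (i + 1) (pvCand id0 i) fuel = pvCand id0 (i + (k₀ : Int)) := by
  intro k₀
  induction k₀ with
  | zero =>
    intro fuel i hf h0 _
    obtain ⟨f, rfl⟩ : ∃ f, fuel = f + 1 := ⟨fuel - 1, by omega⟩
    simp only [pvALoop]
    rw [if_neg (by simpa using h0)]
    simp
  | succ k ih =>
    intro fuel i hf h0 hall
    obtain ⟨f, rfl⟩ : ∃ f, fuel = f + 1 := ⟨fuel - 1, by omega⟩
    simp only [pvALoop]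
    rw [if_pos (by simpa using hall 0 (by omega))]
    have := ih f (i+1) (by omega) (by rw [show i + 1 + (k:Int) = i + ((k+1:Nat):Int) by push_cast; ring]; exact h0)
      (fun (m : Nat) (hm : m < k) => by
        rw [show i + 1 + (m:Int) = i + ((m+1:Nat):Int) by push_cast; ring]; exact hall (m+1) (by omega))
    rw [show i + 1 + 1 = (i+1) + 1 from rfl, this]
    congr 1
    push_cast; ring

-- the invariant tying A's result list to B's counter dict: every suffix below the
-- stored resume point is already taken
def pvInv (ids : List String) (counter : PySem.Dict String Int) : Prop :=
  ∀ p : String, 1 ≤ counter.getD p 1 ∧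
    ∀ j : Int, 1 ≤ j → j < counter.getD p 1 → pvCand p j ∈ ids

theorem pvStep_eq (ids : List String) (counter : PySem.Dict String Int) (id0 : String)
    (h : pvInv ids counter) :
    ∃ counter', pvBStep (ids, ids, counter) id0 =
        (ids ++ [pvALoop ids id0 1 id0 (ids.length + 1)],
         ids ++ [pvALoop ids id0 1 id0 (ids.length + 1)], counter') ∧
      pvInv (ids ++ [pvALoop ids id0 1 id0 (ids.length + 1)]) counter' := by
  by_cases hmem : id0 ∈ ids
  · -- repeated id: both sides find the first free suffix 1 + m₀
    have hlen : 0 < ids.length := List.length_pos_iff.mpr (List.ne_nil_of_mem hmem)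
    have hE : ∃ k : Nat, pvCand id0 (1 + (k : Int)) ∉ ids := by
      by_contra hc
      push Not at hc
      have := pvCount ids id0 hmem (ids.length) (fun k _ => hc k)
      omega
    set m₀ := Nat.find hE with hm₀def
    have hfree : pvCand id0 (1 + (m₀ : Int)) ∉ ids := Nat.find_spec hE
    have hminA : ∀ k : Nat, k < m₀ → pvCand id0 (1 + (k : Int)) ∈ ids := by
      intro k hk
      exact Decidable.not_not.mp (Nat.find_min hE hk)
    have hm₀lt : m₀ < ids.length := by
      have := pvCount ids id0 hmem m₀ hminA
      omega
    have hA : pvALoop ids id0 1 id0 (ids.length + 1) = pvCand id0 (1 + (m₀ : Int)) := by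
      simp only [pvALoop]
      rw [if_pos hmem]
      exact pvALoop_spec ids id0 m₀ ids.length 1 hm₀lt hfree hminA
    have hi0 : 1 ≤ counter.getD id0 1 := (h id0).1
    have hi0le : counter.getD id0 1 ≤ 1 + (m₀ : Int) := by
      by_contra hc
      push Not at hc
      exact hfree ((h id0).2 (1 + (m₀ : Int)) (by omega) hc)
    have hB : pvBLoop ids id0 (counter.getD id0 1) (ids.length + 1) = 1 + (m₀ : Int) := by
      set i0 := counter.getD id0 1 with hi0def
      set k₀ : Nat := m₀ + 1 - i0.toNat with hk₀def
      have hik : i0 + (k₀ : Int) = 1 + (m₀ : Int) := by omega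
      rw [← hik]
      apply pvBLoop_spec ids id0 k₀ (ids.length + 1) i0 (by omega) (by rw [hik]; exact hfree)
      intro k hk
      rw [show i0 + (k : Int) = 1 + ((i0.toNat - 1 + k : Nat) : Int) by omega]
      exact hminA _ (by omega)
    refine ⟨counter.insert id0 (1 + (m₀ : Int) + 1), ?_, ?_⟩
    · simp only [pvBStep]
      rw [if_pos hmem, hA, hB]
      rw [show PySem.Set.add ids (pvCand id0 (1 + (m₀ : Int))) =
          ids ++ [pvCand id0 (1 + (m₀ : Int))] by simp [PySem.Set.add, hfree]]
    · rw [hA]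
      intro p
      by_cases hp : p = id0
      · subst hp
        rw [PySem.Dict.getD_insert, if_pos rfl]
        refine ⟨by omega, ?_⟩
        intro j h1 h2
        by_cases hj : j = 1 + (m₀ : Int)
        · subst hj
          exact List.mem_append_right _ (List.mem_singleton.mpr rfl)
        · rw [show j = 1 + ((j.toNat - 1 : Nat) : Int) by omega]
          exact List.mem_append_left _ (hminA _ (by omega))
      · rw [PySem.Dict.getD_insert, if_neg hp]
        exact ⟨(h p).1, fun j h1 h2 => List.mem_append_left _ ((h p).2 j h1 h2)⟩
  · -- fresh id: both sides append id0; the counter is unchanged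
    have hA : pvALoop ids id0 1 id0 (ids.length + 1) = id0 := by
      simp only [pvALoop]
      rw [if_neg hmem]
    refine ⟨counter, ?_, ?_⟩
    · simp only [pvBStep]
      rw [if_neg hmem, hA]
      rw [show PySem.Set.add ids id0 = ids ++ [id0] by simp [PySem.Set.add, hmem]]
    · rw [hA]
      intro p
      exact ⟨(h p).1, fun j h1 h2 => List.mem_append_left _ ((h p).2 j h1 h2)⟩

theorem pvFold (rest : List String) : ∀ (ids : List String) (counter : PySem.Dict String Int),
    pvInv ids counter →
    (rest.foldl pvBStep (ids, ids, counter)).1 =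
      rest.foldl (fun ids id0 => ids ++ [pvALoop ids id0 1 id0 (ids.length + 1)]) ids := by
  induction rest with
  | nil => intro ids counter _; rfl
  | cons x xs ih =>
    intro ids counter h
    obtain ⟨c', heq, hinv⟩ := pvStep_eq ids counter x h
    simp only [List.foldl_cons]
    rw [heq]
    exact ih _ _ hinv

-- ===== VERDICT (by name: the statement is the Claim_ definition above) =====
theorem make_ids_unique_spec : Claim_equal_make_ids_unique := by
  intro ids0 _
  unfold Spec_make_ids_unique make_ids_unique make_ids_unique_alt
  refine (pvFold ids0 [] PySem.Dict.empty ?_).symm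
  intro p
  constructor
  · simp [PySem.Dict.getD, PySem.Dict.empty, PySem.Dict.get?]
  · intro j h1 h2
    simp [PySem.Dict.getD, PySem.Dict.empty, PySem.Dict.get?] at h2
    omega
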